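-- pv_equiv track=rewrite | github.com/nonieA/clustEHR-MM | clustEHR_MM/test_functions.py | replace_disease
-- ===== SOURCE A (Python) =====
-- def replace_disease(var,cond_dict):
--     cond_list = [j for i in cond_dict.values() for j in i]
--     if var in cond_list:
--         for k, v in cond_dict.items():
--             if var in v:
--                 return k
--     else:
--         return var
-- ===== SOURCE B (Python) =====
-- def replace_disease(var, cond_dict):
--     index = {}
--     for k, v in cond_dict.items():
--         for j in v:
--             index.setdefault(j, k)
--     return index.get(var, var)
-- ===== Notes on version B (the rewrite author's own statement) =====
-- stated objective: alternative
-- what changed: Builds an inverted index (element -> first key, via setdefault) from the dict once and answers with a single hash lookup index.get(var, var), instead of flattening all values, testing membership, then re-scanning the dict.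
import Mathlib
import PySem

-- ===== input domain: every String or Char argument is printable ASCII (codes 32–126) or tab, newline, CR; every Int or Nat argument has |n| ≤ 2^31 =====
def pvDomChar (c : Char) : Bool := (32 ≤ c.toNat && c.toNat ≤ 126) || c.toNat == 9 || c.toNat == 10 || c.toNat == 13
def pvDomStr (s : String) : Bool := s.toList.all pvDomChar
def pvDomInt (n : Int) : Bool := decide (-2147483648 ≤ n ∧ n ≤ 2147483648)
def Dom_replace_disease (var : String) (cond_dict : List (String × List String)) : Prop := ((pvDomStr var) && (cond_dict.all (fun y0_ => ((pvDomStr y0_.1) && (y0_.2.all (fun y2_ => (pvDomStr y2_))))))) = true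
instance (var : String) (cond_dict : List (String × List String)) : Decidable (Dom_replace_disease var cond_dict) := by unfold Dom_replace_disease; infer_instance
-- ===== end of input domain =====

-- B builds an inverted index (element -> first key) once with setdefault and answers by one
-- dictionary lookup, instead of A's flatten-all-values, membership test, then dict re-scan;
-- the return values are proved equal (alternative decomposition, no speed claim).

-- ===== PORT A =====
-- the for-loop of A: first key whose value list contains var (Python falls off with None if
-- no match, which under A's guard is unreachable; modelled as Option)
def replace_disease_find (var : String) : List (String × List String) → Option String
  | [] => none
  | (k, v) :: t => if var ∈ v then some k else replace_disease_find var t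

def replace_disease (var : String) (cond_dict : List (String × List String)) : String :=
  let cond_list := cond_dict.flatMap (fun i => i.2)
  if var ∈ cond_list then
    -- under the guard the loop always returns; getD var is unreachable
    (replace_disease_find var cond_dict).getD var
  else
    var

-- ===== PORT B =====
def replace_disease_alt (var : String) (cond_dict : List (String × List String)) : String :=
  let index : PySem.Dict String String :=
    cond_dict.foldl (fun d kv => kv.2.foldl (fun d j => d.setdefault j kv.1) d) PySem.Dict.empty
  index.getD var var

-- ===== PRECONDITION & SPEC =====
def Spec_replace_disease (var : String) (cond_dict : List (String × List String)) (out : String) : Prop := out = replace_disease_alt var cond_dict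
instance (var : String) (cond_dict : List (String × List String)) (out : String) : Decidable (Spec_replace_disease var cond_dict out) := by unfold Spec_replace_disease; infer_instance

-- ===== CLAIM (what is proved, stated in full; the proofs are below) =====
def Claim_equal_replace_disease : Prop := ∀ (var : String) (cond_dict : List (String × List String)), Dom_replace_disease var cond_dict → Spec_replace_disease var cond_dict (replace_disease var cond_dict)

-- ===== LEMMAS AND PROOFS =====

-- get? over an items list with one pair appended: old lookup wins, the new pair answers last
theorem get?_mk_append_single (items : List (String × String)) (j k x : String) :
    (PySem.Dict.mk (items ++ [(j, k)])).get? x =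
      ((PySem.Dict.mk items).get? x).or (if j = x then some k else none) := by
  induction items with
  | nil => simp [PySem.Dict.get?]
  | cons p t ih =>
    obtain ⟨a, b⟩ := p
    simp only [List.cons_append, PySem.Dict.get?_mk_cons, ih]
    split <;> simp

-- setdefault keeps earlier bindings and only adds j ↦ k when j was absent
theorem get?_setdefault (d : PySem.Dict String String) (j k x : String) :
    (d.setdefault j k).get? x = (d.get? x).or (if j = x then some k else none) := by
  unfold PySem.Dict.setdefault
  by_cases h : d.contains j = true
  · simp only [h, if_true]
    rcases hx : d.get? x with _ | w
    · simp only [Option.none_or]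
      split
      · next hjx =>
        subst hjx
        rw [PySem.Dict.get?_eq_none_iff_contains] at hx
        simp_all
      · rfl
    · simp
  · simp only [h]
    have := get?_mk_append_single d.items j k x
    simpa using this

-- inner loop: registering every element of v under key k, first-come-first-kept
theorem get?_inner_fold (v : List String) (k x : String) (d : PySem.Dict String String) :
    (v.foldl (fun d j => d.setdefault j k) d).get? x =
      (d.get? x).or (if x ∈ v then some k else none) := by
  induction v generalizing d with
  | nil => simp
  | cons j t ih =>
    simp only [List.foldl_cons, ih, get?_setdefault]
    rcases d.get? x with _ | w
    · simp only [Option.none_or]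
      by_cases hj : j = x
      · subst hj; simp
      · have : ¬ x = j := fun h => hj h.symm
        simp [hj, this]
    · simp

-- the whole index build: lookup equals the first matching key of the remaining list
theorem get?_build_fold (var : String) (l : List (String × List String))
    (d : PySem.Dict String String) :
    (l.foldl (fun d kv => kv.2.foldl (fun d j => d.setdefault j kv.1) d) d).get? var =
      (d.get? var).or (replace_disease_find var l) := by
  induction l generalizing d with
  | nil => simp [replace_disease_find]
  | cons h t ih =>
    obtain ⟨k, v⟩ := h
    simp only [List.foldl_cons, ih, get?_inner_fold, replace_disease_find]
    rcases d.get? var with _ | w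
    · simp only [Option.none_or]
      by_cases hv : var ∈ v <;> simp [hv]
    · simp

-- if var occurs in none of the value lists, the scan finds nothing
theorem find_eq_none_of_not_mem (var : String) (l : List (String × List String))
    (h : var ∉ l.flatMap (fun i => i.2)) : replace_disease_find var l = none := by
  induction l with
  | nil => rfl
  | cons p t ih =>
    simp only [List.flatMap_cons, List.mem_append, not_or] at h
    simp only [replace_disease_find]
    split
    · exact absurd ‹var ∈ p.2› h.1
    · exact ih h.2

theorem replace_disease_eq_alt (var : String) (cond_dict : List (String × List String)) :
    replace_disease var cond_dict = replace_disease_alt var cond_dict := by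
  have hb : replace_disease_alt var cond_dict =
      (replace_disease_find var cond_dict).getD var := by
    unfold replace_disease_alt
    simp only [PySem.Dict.getD, get?_build_fold]
    have : (PySem.Dict.empty : PySem.Dict String String).get? var = none := by
      simp [PySem.Dict.get?, PySem.Dict.empty]
    rw [this, Option.none_or]
  rw [hb]
  by_cases hm : var ∈ cond_dict.flatMap (fun i => i.2)
  · simp [replace_disease, hm]
  · simp [replace_disease, hm, find_eq_none_of_not_mem var cond_dict hm]

-- ===== VERDICT (by name: the statement is the Claim_ definition above) =====
theorem replace_disease_spec : Claim_equal_replace_disease := by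
  intro var cond_dict _
  exact replace_disease_eq_alt var cond_dict
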